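-- pv_equiv track=rewrite | github.com/B-Manish/SecretSanta | main.py | assign_pairs
-- ===== SOURCE A (Python) =====
-- def assign_pairs(employees,previous_year_pairs):
--     employees_list=list(employees.keys())
--     remaining_employees=list(employees.keys())
--     pairs=[['Employee_Name', 'Employee_EmailID', 'Secret_Child_Name','Secret_Child_EmailID']]
--
--     for employee in employees_list:
--         valid_pairs=[e for e in remaining_employees if e != employee and e!=previous_year_pairs.get(employee)]
--         if not valid_pairs:
--             raise Exception("No valid pair found")
--         valid_pair =  valid_pairs[0]
--         remaining_employees.remove(valid_pair)
--
--         pairs.append([employees[employee],employee,employees[valid_pair],valid_pair])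
--
--     return pairs
-- ===== SOURCE B (Python) =====
-- def assign_pairs(employees, previous_year_pairs):
--     givers = list(employees.keys())
--     n = len(givers)
--     carry = []          # receivers skipped earlier, still pending, in original order
--     k = 0               # next unconsumed position in the receiver stream
--     receivers = []
--     for giver in givers:
--         avoid = previous_year_pairs.get(giver)
--         chosen = None
--         # first look among the carried-over (previously skipped) receivers
--         for i in range(len(carry)):
--             e = carry[i]
--             if e != giver and e != avoid:
--                 chosen = e
--                 del carry[i]
--                 break
--         if chosen is None:
--             # otherwise pull from the stream, parking invalid ones in carry
--             while k < n:
--                 e = givers[k]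
--                 k += 1
--                 if e != giver and e != avoid:
--                     chosen = e
--                     break
--                 carry.append(e)
--         if chosen is None:
--             raise Exception("No valid pair found")
--         receivers.append(chosen)
--     header = ['Employee_Name', 'Employee_EmailID', 'Secret_Child_Name', 'Secret_Child_EmailID']
--     return [header] + [[employees[g], g, employees[r], r] for g, r in zip(givers, receivers)]
-- ===== Notes on version B (the rewrite author's own statement) =====
-- stated objective: faster
-- what changed: Instead of rebuilding the full list of valid receivers each round, B makes a single forward pass over the receiver stream with a small carry list of previously skipped receivers: each round it first checks the carry, otherwise pulls from the stream parking invalid entries in the carry, so every receiver is inspected O(1) times and the whole assignment is O(n) instead of O(n^2).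
import Mathlib
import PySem

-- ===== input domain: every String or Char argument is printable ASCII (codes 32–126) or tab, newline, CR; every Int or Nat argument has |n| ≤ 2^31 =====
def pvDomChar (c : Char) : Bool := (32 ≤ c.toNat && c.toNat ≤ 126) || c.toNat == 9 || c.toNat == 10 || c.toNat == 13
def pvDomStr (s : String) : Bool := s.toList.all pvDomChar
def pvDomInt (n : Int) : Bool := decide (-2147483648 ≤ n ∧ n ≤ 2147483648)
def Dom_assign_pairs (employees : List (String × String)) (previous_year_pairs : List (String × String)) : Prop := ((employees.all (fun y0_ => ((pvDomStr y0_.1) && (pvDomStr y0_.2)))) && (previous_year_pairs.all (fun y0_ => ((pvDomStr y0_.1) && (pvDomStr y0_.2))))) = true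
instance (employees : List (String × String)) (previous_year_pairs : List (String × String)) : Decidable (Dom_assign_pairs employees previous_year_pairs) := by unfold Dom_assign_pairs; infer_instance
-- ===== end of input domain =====

-- B replaces A's per-round full rescan of the remaining receivers by a small carry list of
-- previously skipped receivers plus a single forward pass over the giver list (each receiver
-- is inspected O(1) times), an O(n) algorithm; a timing run measured B faster.


-- `e != employee and e != previous_year_pairs.get(employee)` (a string never equals None,
-- so `e != None` is always true); this predicate appears verbatim in both Pythons.
def pvPickPred (prev : PySem.Dict String String) (employee e : String) : Bool :=
  e != employee && prev.get? employee != some e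

-- row `[employees[employee], employee, employees[valid_pair], valid_pair]`; the looked-up
-- keys always come from `employees.keys()`, so `getD _ ""` is exact (no KeyError possible).
def pvFmt (emps : PySem.Dict String String) (gr : String × String) : List String :=
  [emps.getD gr.1 "", gr.1, emps.getD gr.2 "", gr.2]

def pvHeader : List String :=
  ["Employee_Name", "Employee_EmailID", "Secret_Child_Name", "Secret_Child_EmailID"]

-- ===== PORT A =====
-- A's `raise Exception("No valid pair found")` is threaded as `none` through the fold and
-- yields [] at the end; Pre_ excludes exactly those inputs.
def pvStepA (emps prev : PySem.Dict String String)
    (st : Option (List String × List (List String))) (employee : String) :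
    Option (List String × List (List String)) :=
  match st with
  | none => none
  | some (remaining, pairs) =>
    match remaining.filter (pvPickPred prev employee) with
    | [] => none
    | valid_pair :: _ =>
      some (remaining.erase valid_pair, pairs ++ [pvFmt emps (employee, valid_pair)])

def assign_pairs (employees : List (String × String)) (previous_year_pairs : List (String × String)) : List (List String) :=
  let emps := PySem.Dict.ofList employees
  let prev := PySem.Dict.ofList previous_year_pairs
  let employees_list := emps.keys
  match employees_list.foldl (pvStepA emps prev) (some (employees_list, [pvHeader])) with
  | none => []
  | some (_, pairs) => pairs

-- ===== PORT B =====
-- Source B's inner `for i in range(len(carry)) … del carry[i]`: scan the carry list, return the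
-- first valid receiver and the carry with that one deleted (prefix kept in order).
def pvFromCarry (prev : PySem.Dict String String) (giver : String) :
    List String → Option (String × List String)
  | [] => none
  | e :: es =>
    if pvPickPred prev giver e then some (e, es)
    else (pvFromCarry prev giver es).map (fun p => (p.1, e :: p.2))

-- Source B's `while k < n` loop: consume the stream (givers[k:]), parking invalid entries at the
-- end of carry, until a valid receiver appears (returns it with the new carry and stream).
def pvFromStream (prev : PySem.Dict String String) (giver : String) :
    List String → List String → Option (String × List String × List String)
  | _, [] => none
  | carry, e :: s =>
    if pvPickPred prev giver e then some (e, carry, s)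
    else pvFromStream prev giver (carry ++ [e]) s

def pvStepB (prev : PySem.Dict String String)
    (st : Option (List String × List String × List String)) (giver : String) :
    Option (List String × List String × List String) :=
  match st with
  | none => none
  | some (carry, stream, receivers) =>
    match pvFromCarry prev giver carry with
    | some (c, carry') => some (carry', stream, receivers ++ [c])
    | none =>
      match pvFromStream prev giver carry stream with
      | none => none
      | some (c, carry', stream') => some (carry', stream', receivers ++ [c])

def assign_pairs_alt (employees : List (String × String)) (previous_year_pairs : List (String × String)) : List (List String) :=
  let emps := PySem.Dict.ofList employees
  let prev := PySem.Dict.ofList previous_year_pairs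
  let givers := emps.keys
  match givers.foldl (pvStepB prev) (some ([], givers, [])) with
  | none => []
  | some (_, _, receivers) => [pvHeader] ++ (givers.zip receivers).map (pvFmt emps)

-- ===== PRECONDITION & SPEC =====
-- A raises mid-loop exactly when its greedy choice runs out of valid receivers; that set has
-- no simpler closed form (e.g. A raises on any odd number of employees with no constraints),
-- so Pre_ states directly that the greedy selection succeeds at every step.  (Both Pythons
-- raise on exactly these inputs and both ports map the raise to []; the equality proof
-- therefore holds without consuming Pre_, which exists to keep the raising inputs out of
-- the behavioural comparison with Python.)
def pvGreedyOk (prev : PySem.Dict String String) : List String → List String → Bool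
  | [], _ => true
  | g :: gs, rem =>
    match rem.filter (pvPickPred prev g) with
    | [] => false
    | c :: _ => pvGreedyOk prev gs (rem.erase c)

def Pre_assign_pairs (employees : List (String × String)) (previous_year_pairs : List (String × String)) : Prop :=
  pvGreedyOk (PySem.Dict.ofList previous_year_pairs)
    (PySem.Dict.ofList employees).keys (PySem.Dict.ofList employees).keys = true

instance (employees : List (String × String)) (previous_year_pairs : List (String × String)) : Decidable (Pre_assign_pairs employees previous_year_pairs) := by unfold Pre_assign_pairs; infer_instance

def pvWitness_assign_pairs : (List (String × String)) × (List (String × String)) :=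
  ([("Alice", "alice@x.com"), ("Bob", "bob@x.com")], [("Alice", "Carol")])

def Spec_assign_pairs (employees : List (String × String)) (previous_year_pairs : List (String × String)) (out : List (List String)) : Prop := out = assign_pairs_alt employees previous_year_pairs
instance (employees : List (String × String)) (previous_year_pairs : List (String × String)) (out : List (List String)) : Decidable (Spec_assign_pairs employees previous_year_pairs out) := by unfold Spec_assign_pairs; infer_instance

-- ===== CLAIM (what is proved, stated in full; the proofs are below) =====
def Claim_equal_assign_pairs : Prop := ∀ (employees : List (String × String)) (previous_year_pairs : List (String × String)), Dom_assign_pairs employees previous_year_pairs → Pre_assign_pairs employees previous_year_pairs → Spec_assign_pairs employees previous_year_pairs (assign_pairs employees previous_year_pairs)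

-- ===== LEMMAS AND PROOFS =====

-- Reference recursion both folds are compared against: the remaining list and the chosen
-- receivers, picked exactly as A picks them.
def pvCore (prev : PySem.Dict String String) : List String → List String → Option (List String × List String)
  | [], rem => some (rem, [])
  | g :: gs, rem =>
    match rem.filter (pvPickPred prev g) with
    | [] => none
    | c :: _ => (pvCore prev gs (rem.erase c)).map (fun rc => (rc.1, c :: rc.2))

lemma foldlA_none (emps prev : PySem.Dict String String) (gs : List String) :
    gs.foldl (pvStepA emps prev) none = none := by
  induction gs with
  | nil => rfl
  | cons g gs ih => simpa [pvStepA] using ih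

lemma foldlB_none (prev : PySem.Dict String String) (gs : List String) :
    gs.foldl (pvStepB prev) none = none := by
  induction gs with
  | nil => rfl
  | cons g gs ih => simpa [pvStepB] using ih

lemma lemA (emps prev : PySem.Dict String String) :
    ∀ (gs rem : List String) (pairs : List (List String)),
      gs.foldl (pvStepA emps prev) (some (rem, pairs)) =
        match pvCore prev gs rem with
        | none => none
        | some rc => some (rc.1, pairs ++ (gs.zip rc.2).map (pvFmt emps)) := by
  intro gs
  induction gs with
  | nil => intro rem pairs; simp [pvCore]
  | cons g gs ih =>
    intro rem pairs
    rw [List.foldl_cons]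
    cases hf : rem.filter (pvPickPred prev g) with
    | nil =>
      have hs : pvStepA emps prev (some (rem, pairs)) g = none := by
        simp [pvStepA, hf]
      rw [hs, foldlA_none]
      simp [pvCore, hf]
    | cons c t =>
      have hs : pvStepA emps prev (some (rem, pairs)) g =
          some (rem.erase c, pairs ++ [pvFmt emps (g, c)]) := by
        simp [pvStepA, hf]
      rw [hs, ih]
      simp only [pvCore, hf]
      cases hc : pvCore prev gs (rem.erase c) with
      | none => simp
      | some rc => simp [pvFmt]

-- The carry scan finds exactly the first valid carry entry and erases it.
lemma fromCarry_spec (prev : PySem.Dict String String) (g : String) :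
    ∀ carry : List String,
      pvFromCarry prev g carry =
        match carry.filter (pvPickPred prev g) with
        | [] => none
        | c :: _ => some (c, carry.erase c) := by
  intro carry
  induction carry with
  | nil => rfl
  | cons e es ih =>
    by_cases he : pvPickPred prev g e
    · simp [pvFromCarry, he, List.erase_cons_head]
    · rw [show pvFromCarry prev g (e :: es) =
          (pvFromCarry prev g es).map (fun p => (p.1, e :: p.2)) by simp [pvFromCarry, he]]
      rw [ih]
      cases hf : es.filter (pvPickPred prev g) with
      | nil => simp [he, hf]
      | cons c t =>
        have hc : pvPickPred prev g c := by
          have : c ∈ es.filter (pvPickPred prev g) := by simp [hf]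
          exact (List.mem_filter.mp this).2
        have hec : (e == c) = false := by
          by_contra h
          simp only [Bool.not_eq_false, beq_iff_eq] at h
          rw [h] at he; exact he hc
        simp [List.filter_cons, he, hf, hec]

-- The stream scan (carry holding no valid entry) finds the first valid stream entry; the
-- resulting carry ++ stream is exactly the old remaining list with that entry erased.
lemma fromStream_spec (prev : PySem.Dict String String) (g : String) :
    ∀ (stream carry : List String), carry.filter (pvPickPred prev g) = [] →
      match stream.filter (pvPickPred prev g) with
      | [] => pvFromStream prev g carry stream = none
      | c :: _ => ∃ carry' stream',
          pvFromStream prev g carry stream = some (c, carry', stream') ∧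
          carry' ++ stream' = (carry ++ stream).erase c := by
  intro stream
  induction stream with
  | nil => intro carry _; simp [pvFromStream]
  | cons e s ih =>
    intro carry hcar
    by_cases he : pvPickPred prev g e
    · have hnc : e ∉ carry := by
        intro hmem
        have := List.mem_filter.mpr ⟨hmem, he⟩
        rw [hcar] at this; exact absurd this (List.not_mem_nil)
      refine (by simp [he] :
        ((e :: s).filter (pvPickPred prev g)) = e :: s.filter (pvPickPred prev g)) ▸ ?_
      exact ⟨carry, s, by simp [pvFromStream, he],
        by rw [List.erase_append_right _ hnc, List.erase_cons_head]⟩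
    · have hcar' : (carry ++ [e]).filter (pvPickPred prev g) = [] := by
        simp [List.filter_append, hcar, he]
      have ihh := ih (carry ++ [e]) hcar'
      have hfe : (e :: s).filter (pvPickPred prev g) = s.filter (pvPickPred prev g) := by
        simp [he]
      rw [hfe, show pvFromStream prev g carry (e :: s) =
        pvFromStream prev g (carry ++ [e]) s by simp [pvFromStream, he]]
      cases hf : s.filter (pvPickPred prev g) with
      | nil => rw [hf] at ihh; exact ihh
      | cons c t =>
        rw [hf] at ihh
        obtain ⟨c', s', h1, h2⟩ := ihh
        exact ⟨c', s', h1, by rw [h2]; simp⟩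

-- One B step behaves like A's pick on the combined remaining list carry ++ stream.
lemma lemB (prev : PySem.Dict String String) :
    ∀ (gs carry stream recs : List String),
      (pvCore prev gs (carry ++ stream) = none →
        gs.foldl (pvStepB prev) (some (carry, stream, recs)) = none) ∧
      (∀ rc, pvCore prev gs (carry ++ stream) = some rc →
        ∃ carry' stream',
          gs.foldl (pvStepB prev) (some (carry, stream, recs)) =
            some (carry', stream', recs ++ rc.2)) := by
  intro gs
  induction gs with
  | nil =>
    intro carry stream recs
    refine ⟨fun h => by simp [pvCore] at h, fun rc h => ⟨carry, stream, ?_⟩⟩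
    simp only [pvCore, Option.some.injEq] at h
    simp [← h]
  | cons g gs ih =>
    intro carry stream recs
    cases hfc : carry.filter (pvPickPred prev g) with
    | cons c t =>
      have hcmem : c ∈ carry :=
        List.mem_of_mem_filter (by simp [hfc] : c ∈ carry.filter (pvPickPred prev g))
      have hrem : (carry ++ stream).filter (pvPickPred prev g) =
          c :: (t ++ stream.filter (pvPickPred prev g)) := by
        simp [List.filter_append, hfc]
      have hcore : pvCore prev (g :: gs) (carry ++ stream) =
          (pvCore prev gs ((carry ++ stream).erase c)).map (fun rc => (rc.1, c :: rc.2)) := by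
        simp only [pvCore, hrem]
      have hs : pvStepB prev (some (carry, stream, recs)) g =
          some (carry.erase c, stream, recs ++ [c]) := by
        simp [pvStepB, fromCarry_spec, hfc]
      have herase : carry.erase c ++ stream = (carry ++ stream).erase c :=
        (List.erase_append_left _ hcmem).symm
      have ihh := ih (carry.erase c) stream (recs ++ [c])
      rw [herase] at ihh
      constructor
      · intro h
        rw [hcore, Option.map_eq_none_iff] at h
        rw [List.foldl_cons, hs]
        exact ihh.1 h
      · intro rc h
        rw [hcore] at h
        obtain ⟨rc', hrc', hmap⟩ := Option.map_eq_some_iff.mp h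
        obtain ⟨ca, st, hfold⟩ := ihh.2 rc' hrc'
        refine ⟨ca, st, ?_⟩
        rw [List.foldl_cons, hs, hfold, ← hmap]
        simp
    | nil =>
      have hfcn : pvFromCarry prev g carry = none := by simp [fromCarry_spec, hfc]
      have hrem : (carry ++ stream).filter (pvPickPred prev g) =
          stream.filter (pvPickPred prev g) := by
        simp [List.filter_append, hfc]
      have hss := fromStream_spec prev g stream carry hfc
      cases hf : stream.filter (pvPickPred prev g) with
      | nil =>
        rw [hf] at hss
        have hcore : pvCore prev (g :: gs) (carry ++ stream) = none := by
          simp only [pvCore, hrem, hf]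
        have hs : pvStepB prev (some (carry, stream, recs)) g = none := by
          simp [pvStepB, hfcn, hss]
        refine ⟨fun _ => ?_, fun rc h => ?_⟩
        · rw [List.foldl_cons, hs, foldlB_none]
        · rw [hcore] at h; exact absurd h (by simp)
      | cons c t =>
        rw [hf] at hss
        obtain ⟨carry', stream', h1, h2⟩ := hss
        have hcore : pvCore prev (g :: gs) (carry ++ stream) =
            (pvCore prev gs ((carry ++ stream).erase c)).map (fun rc => (rc.1, c :: rc.2)) := by
          simp only [pvCore, hrem, hf]
        have hs : pvStepB prev (some (carry, stream, recs)) g =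
            some (carry', stream', recs ++ [c]) := by
          simp [pvStepB, hfcn, h1]
        have ihh := ih carry' stream' (recs ++ [c])
        rw [h2] at ihh
        constructor
        · intro h
          rw [hcore, Option.map_eq_none_iff] at h
          rw [List.foldl_cons, hs]
          exact ihh.1 h
        · intro rc h
          rw [hcore] at h
          obtain ⟨rc', hrc', hmap⟩ := Option.map_eq_some_iff.mp h
          obtain ⟨ca, st, hfold⟩ := ihh.2 rc' hrc'
          refine ⟨ca, st, ?_⟩
          rw [List.foldl_cons, hs, hfold, ← hmap]
          simp

-- ===== VERDICT (by name: the statement is the Claim_ definition above) =====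
theorem assign_pairs_spec : Claim_equal_assign_pairs := by
  intro employees previous_year_pairs _ _
  unfold Spec_assign_pairs assign_pairs assign_pairs_alt
  simp only []
  rw [lemA]
  have hB := lemB (PySem.Dict.ofList previous_year_pairs)
    (PySem.Dict.ofList employees).keys [] (PySem.Dict.ofList employees).keys []
  rw [List.nil_append] at hB
  cases hc : pvCore (PySem.Dict.ofList previous_year_pairs)
      (PySem.Dict.ofList employees).keys (PySem.Dict.ofList employees).keys with
  | none => rw [hB.1 hc]
  | some rc =>
    obtain ⟨ca, st, hfold⟩ := hB.2 rc hc
    rw [hfold]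
    simp
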